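-- pv_equiv track=rewrite | github.com/CrunchyJohnHaven/elastifund | scripts/run_btc5_command_node_autoresearch.py | _consecutive_discards
-- ===== SOURCE A (Python) =====
-- from typing import Any, Sequence
--
-- def _consecutive_discards(rows: list[dict[str, Any]]) -> int:
--     count = 0
--     for row in reversed(rows):
--         status = str(row.get("status") or "")
--         if status == "keep":
--             break
--         if status == "discard":
--             count += 1
--     return count
-- ===== SOURCE B (Python) =====
-- def _consecutive_discards(rows):
--     statuses = [str(row.get("status") or "") for row in rows]
--     if "keep" in statuses:
--         last_keep = len(statuses) - 1 - statuses[::-1].index("keep")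
--         statuses = statuses[last_keep + 1:]
--     return statuses.count("discard")
-- ===== Notes on version B (the rewrite author's own statement) =====
-- stated objective: alternative
-- what changed: Replaces the reversed accumulator loop with an early break by staged list passes: extract all statuses once, locate the last 'keep' by index and slice it off, then count 'discard' in the remaining tail.
import Mathlib
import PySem

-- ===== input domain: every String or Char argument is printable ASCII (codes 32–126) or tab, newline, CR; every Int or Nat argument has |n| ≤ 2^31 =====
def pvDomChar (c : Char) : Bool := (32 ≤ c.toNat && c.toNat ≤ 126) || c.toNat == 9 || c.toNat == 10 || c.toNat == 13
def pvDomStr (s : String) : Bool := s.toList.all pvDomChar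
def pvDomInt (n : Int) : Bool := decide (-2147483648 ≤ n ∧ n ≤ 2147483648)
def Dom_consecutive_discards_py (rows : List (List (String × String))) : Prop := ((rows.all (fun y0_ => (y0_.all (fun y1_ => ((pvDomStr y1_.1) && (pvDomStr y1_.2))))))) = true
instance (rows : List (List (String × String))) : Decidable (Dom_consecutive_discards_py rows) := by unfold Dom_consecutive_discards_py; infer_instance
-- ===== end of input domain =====

-- B replaces A's reversed break-loop by staged passes: map to statuses, slice off everything
-- up to the last "keep", then count "discard" (alternative decomposition, same cost).

-- ===== PORT A =====
-- str(row.get("status") or ""): within Dom all values are strings, so only "" is falsy and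
-- str is the identity; a missing key gives "".
def pvStatus (row : List (String × String)) : String :=
  ((PySem.Dict.mk row).get? "status").getD ""

-- loop over reversed(rows); 'break' on "keep" modeled as returning the accumulator
def pvALoop (l : List (List (String × String))) (count : Int) : Int :=
  match l with
  | [] => count
  | row :: rest =>
    let status := pvStatus row
    if status == "keep" then count
    else if status == "discard" then pvALoop rest (count + 1)
    else pvALoop rest count

def consecutive_discards_py (rows : List (List (String × String))) : Int :=
  pvALoop rows.reverse 0

-- ===== PORT B =====
-- statuses[::-1] is List.reverse; statuses.index("keep") is guarded by the membership test,
-- so the .getD 0 default is never taken; statuses[last_keep+1:] is a nonnegative-start slice.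
def consecutive_discards_py_alt (rows : List (List (String × String))) : Int :=
  let statuses := rows.map pvStatus
  let statuses' :=
    if statuses.contains "keep" then
      let j := (PySem.List.index? statuses.reverse "keep").getD 0
      let last_keep : Int := (statuses.length : Int) - 1 - (j : Int)
      PySem.List.slice statuses (some (last_keep + 1)) none
    else statuses
  (statuses'.count "discard" : Int)

-- ===== PRECONDITION & SPEC =====
def Spec_consecutive_discards_py (rows : List (List (String × String))) (out : Int) : Prop := out = consecutive_discards_py_alt rows
instance (rows : List (List (String × String))) (out : Int) : Decidable (Spec_consecutive_discards_py rows out) := by unfold Spec_consecutive_discards_py; infer_instance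

-- ===== CLAIM (what is proved, stated in full; the proofs are below) =====
def Claim_equal_consecutive_discards_py : Prop := ∀ (rows : List (List (String × String))), Dom_consecutive_discards_py rows → Spec_consecutive_discards_py rows (consecutive_discards_py rows)

-- ===== LEMMAS AND PROOFS =====

-- A's break-loop counts "discard" in the prefix of the statuses before the first "keep"
theorem pvALoop_eq_ref (l : List (List (String × String))) (c : Int) :
    pvALoop l c = c + (((l.map pvStatus).takeWhile (fun s => !(s == "keep"))).count "discard" : Int) := by
  induction l generalizing c with
  | nil => simp [pvALoop]
  | cons row rest ih =>
    simp only [pvALoop, List.map_cons, List.takeWhile_cons]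
    by_cases h1 : pvStatus row == "keep"
    · simp [h1]
    · simp only [h1, Bool.not_false, if_true]
      by_cases h2 : pvStatus row == "discard"
      · rw [if_pos h2, ih, List.count_cons]
        have : pvStatus row = "discard" := by simpa using h2
        simp [this]; ring
      · rw [if_neg h2, ih, List.count_cons]
        have : ¬ pvStatus row = "discard" := by simpa using h2
        simp [this]

-- taking while ≠ "keep" over a list whose first "keep" follows pre yields pre
theorem takeWhile_of_no_keep (pre suf : List String) (h : "keep" ∉ pre) :
    ((pre ++ "keep" :: suf).takeWhile (fun s => !(s == "keep"))) = pre := by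
  induction pre with
  | nil => simp
  | cons a t ih =>
    have ha : (!(a == "keep")) = true := by
      simp only [Bool.not_eq_eq_eq_not, Bool.not_true, beq_eq_false_iff_ne]
      exact fun e => h (e ▸ List.mem_cons_self)
    simp only [List.cons_append, List.takeWhile_cons, ha, if_true]
    rw [ih (fun hm => h (List.mem_cons_of_mem _ hm))]

-- B's staged passes compute the same reference count, for any status list
theorem alt_body_eq (ss : List String) :
    ((if ss.contains "keep" then
        PySem.List.slice ss
          (some ((((ss.length : Int) - 1 - (((PySem.List.index? ss.reverse "keep").getD 0 : Nat) : Int)) + 1)))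
          none
      else ss).count "discard" : Int)
    = ((ss.reverse.takeWhile (fun s => !(s == "keep"))).count "discard" : Int) := by
  by_cases hk : "keep" ∈ ss
  · have hkr : "keep" ∈ ss.reverse := by simpa using hk
    have hsome : (PySem.List.index? ss.reverse "keep").isSome := by
      rw [PySem.List.index?_isSome_iff]; exact hkr
    obtain ⟨j, hj⟩ := Option.isSome_iff_exists.1 hsome
    obtain ⟨pre, suf, hsplit, hlen, hnot⟩ := (PySem.List.index?_eq_some_iff _ _ _).1 hj
    have hss : ss = suf.reverse ++ "keep" :: pre.reverse := by
      have := congrArg List.reverse hsplit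
      simpa using this
    have hlength : ss.length = pre.length + 1 + suf.length := by
      have := congrArg List.length hsplit
      simp at this; omega
    have hcast : ((ss.length : Int) - 1 - (j : Int)) + 1 = ((suf.length + 1 : Nat) : Int) := by
      subst hlen; push_cast; omega
    rw [if_pos (by simpa using hk), hj, Option.getD_some, hcast,
        PySem.List.slice_from_natCast]
    have hdrop : ss.drop (suf.length + 1) = pre.reverse := by
      rw [hss]
      have : suf.reverse ++ "keep" :: pre.reverse = (suf.reverse ++ ["keep"]) ++ pre.reverse := by
        simp
      rw [this]
      have hl : (suf.reverse ++ ["keep"]).length = suf.length + 1 := by simp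
      rw [← hl, List.drop_left]
    rw [hdrop, hsplit, takeWhile_of_no_keep _ _ hnot, List.count_reverse]
  · have hkr : ∀ s ∈ ss.reverse, (!(s == "keep")) = true := by
      intro s hs
      have : s ∈ ss := by simpa using hs
      simp only [Bool.not_eq_eq_eq_not, Bool.not_true, beq_eq_false_iff_ne]
      exact fun e => hk (e ▸ this)
    rw [if_neg (by simpa using hk), List.takeWhile_eq_self_iff.2 hkr, List.count_reverse]

-- ===== VERDICT (by name: the statement is the Claim_ definition above) =====
theorem consecutive_discards_py_spec : Claim_equal_consecutive_discards_py := by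
  intro rows _
  unfold Spec_consecutive_discards_py consecutive_discards_py consecutive_discards_py_alt
  rw [pvALoop_eq_ref, alt_body_eq, List.map_reverse]
  ring
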